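-- pv_equiv track=rewrite | github.com/kaltepeter/aoc | python/2022/day_9/day.py | is_touching
-- ===== SOURCE A (Python) =====
-- from typing import List, Literal, Set, Tuple
--
-- Position = Tuple[int, int]
--
-- def is_touching(h: Position, t: Position, max_distance: int = 1) -> bool:
--     touching = False
--     neighbors = [
--         (x, y) for x in range(h[0] - 1, h[0] + 2) for y in range(h[1] - 1, h[1] + 2)
--     ]
--     if t in neighbors:
--         touching = True
--     return touching
-- ===== SOURCE B (Python) =====
-- def is_touching(h, t, max_distance=1):
--     # Closed-form Chebyshev check; max_distance kept for signature parity (A ignores it too).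
--     return abs(h[0] - t[0]) <= 1 and abs(h[1] - t[1]) <= 1
-- ===== Notes on version B (the rewrite author's own statement) =====
-- stated objective: simpler
-- what changed: Replaces building the 9-element neighbor list and a membership scan with a direct closed-form Chebyshev-distance comparison.
import Mathlib
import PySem

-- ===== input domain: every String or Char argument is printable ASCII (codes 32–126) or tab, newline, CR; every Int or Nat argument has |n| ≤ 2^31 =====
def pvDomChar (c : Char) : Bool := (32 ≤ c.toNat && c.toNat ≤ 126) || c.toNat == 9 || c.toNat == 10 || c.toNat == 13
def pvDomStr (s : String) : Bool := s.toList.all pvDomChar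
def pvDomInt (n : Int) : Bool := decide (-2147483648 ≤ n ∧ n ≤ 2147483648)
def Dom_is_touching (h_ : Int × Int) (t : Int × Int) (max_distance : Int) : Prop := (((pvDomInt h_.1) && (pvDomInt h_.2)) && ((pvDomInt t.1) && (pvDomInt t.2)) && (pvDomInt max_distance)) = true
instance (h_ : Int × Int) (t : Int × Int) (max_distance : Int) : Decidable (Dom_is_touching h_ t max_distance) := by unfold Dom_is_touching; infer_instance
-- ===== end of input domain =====

-- B replaces A's 9-element neighbor-list build + membership scan with a closed-form Chebyshev-distance comparison (objective: simpler).


-- ===== PORT A =====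
-- Port of A: build the 3×3 neighbor list comprehension, then a membership test.
def is_touching (h_ : Int × Int) (t : Int × Int) (max_distance : Int) : Bool :=
  let touching := false
  let neighbors :=
    (PySem.List.pyRange (h_.1 - 1) (h_.1 + 2) 1).flatMap (fun x =>
      (PySem.List.pyRange (h_.2 - 1) (h_.2 + 2) 1).map (fun y => (x, y)))
  let touching := if neighbors.contains t then true else touching
  touching

-- ===== PORT B =====
-- Port of B: closed-form Chebyshev-distance check (max_distance unused, as in A).
def is_touching_alt (h_ : Int × Int) (t : Int × Int) (max_distance : Int) : Bool :=
  decide (|h_.1 - t.1| ≤ 1 ∧ |h_.2 - t.2| ≤ 1)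

-- ===== PRECONDITION & SPEC =====
def Spec_is_touching (h_ : Int × Int) (t : Int × Int) (max_distance : Int) (out : Bool) : Prop := out = is_touching_alt h_ t max_distance
instance (h_ : Int × Int) (t : Int × Int) (max_distance : Int) (out : Bool) : Decidable (Spec_is_touching h_ t max_distance out) := by unfold Spec_is_touching; infer_instance

-- ===== CLAIM (what is proved, stated in full; the proofs are below) =====
def Claim_equal_is_touching : Prop := ∀ (h_ : Int × Int) (t : Int × Int) (max_distance : Int), Dom_is_touching h_ t max_distance → Spec_is_touching h_ t max_distance (is_touching h_ t max_distance)

-- ===== LEMMAS AND PROOFS =====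

-- ===== VERDICT (by name: the statement is the Claim_ definition above) =====
theorem is_touching_spec : Claim_equal_is_touching := by
  intro h_ t m _
  rcases h_ with ⟨hx, hy⟩
  rcases t with ⟨tx, ty⟩
  unfold Spec_is_touching is_touching is_touching_alt
  simp only [List.contains_eq_mem, Bool.if_false_right, Bool.if_true_left,
    Bool.and_true, Bool.decide_and, decide_eq_true_eq, Bool.decide_eq_true]
  rw [← Bool.decide_and, decide_eq_decide]
  simp only [List.mem_flatMap, List.mem_map, PySem.List.mem_pyRange_one, Prod.mk.injEq]
  constructor
  · rintro ⟨x, hxr, y, hyr, rfl, rfl⟩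
    constructor <;> rw [abs_le] <;> omega
  · rintro ⟨ha, hb⟩
    rw [abs_le] at ha hb
    exact ⟨tx, ⟨by omega, by omega⟩, ty, ⟨by omega, by omega⟩, rfl, rfl⟩
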